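-- pv_equiv track=rewrite | github.com/danyellambert/ai-workbench-local | src/rag/loaders.py | _merge_contact_lists
-- ===== SOURCE A (Python) =====
-- def _merge_contact_lists(legacy_values: list[str], evidence_values: list[str]) -> tuple[list[str], dict[str, int]]:
--     legacy = [item for item in legacy_values if item]
--     evidence = [item for item in evidence_values if item]
--     merged = list(legacy)
--     complements = 0
--     conflicts = 0
--     for item in evidence:
--         if item in legacy:
--             continue
--         if legacy:
--             conflicts += 1
--             continue
--         merged.append(item)
--         complements += 1
--     return merged, {"complements": complements, "conflicts": conflicts}
-- ===== SOURCE B (Python) =====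
-- def _merge_contact_lists(legacy_values: list[str], evidence_values: list[str]) -> tuple[list[str], dict[str, int]]:
--     legacy = list(filter(None, legacy_values))
--     evidence = list(filter(None, evidence_values))
--     if not legacy:
--         return evidence, {"complements": len(evidence), "conflicts": 0}
--     # Frequency map of evidence; conflicts = total evidence minus the
--     # frequencies of the distinct keys that also occur in legacy.
--     counts: dict[str, int] = {}
--     for item in evidence:
--         counts[item] = counts.get(item, 0) + 1
--     legacy_set = set(legacy)
--     overlap = sum(n for key, n in counts.items() if key in legacy_set)
--     return legacy, {"complements": 0, "conflicts": len(evidence) - overlap}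
-- ===== Notes on version B (the rewrite author's own statement) =====
-- stated objective: faster
-- what changed: Replaces A's per-item loop (which rescans legacy for every evidence item and branches on 'if legacy' inside the loop) by a case split on empty legacy plus a frequency-map pass: B builds a dict of evidence multiplicities, sums the multiplicities of the distinct keys that also occur in a set of legacy, and derives conflicts arithmetically as len(evidence) minus that overlap.
import Mathlib
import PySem

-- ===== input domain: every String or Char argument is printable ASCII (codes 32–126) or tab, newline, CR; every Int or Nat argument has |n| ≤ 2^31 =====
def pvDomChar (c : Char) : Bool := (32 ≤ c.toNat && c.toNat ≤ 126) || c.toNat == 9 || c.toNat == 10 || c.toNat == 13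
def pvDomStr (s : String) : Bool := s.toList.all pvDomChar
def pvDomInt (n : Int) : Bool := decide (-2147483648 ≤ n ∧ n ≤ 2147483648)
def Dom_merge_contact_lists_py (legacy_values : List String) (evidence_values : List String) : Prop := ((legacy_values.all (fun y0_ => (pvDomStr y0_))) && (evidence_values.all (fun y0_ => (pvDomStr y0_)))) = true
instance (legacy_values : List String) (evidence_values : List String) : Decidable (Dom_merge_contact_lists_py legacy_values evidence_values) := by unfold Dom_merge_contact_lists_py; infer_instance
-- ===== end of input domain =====

-- B replaces A's per-item loop (rescanning legacy, branching on `if legacy` inside the loop) by a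
-- case split on empty legacy plus a frequency map of evidence: conflicts is derived arithmetically
-- as len(evidence) minus the summed multiplicities of the distinct keys also present in legacy.

-- ===== PORT A =====
-- one step of A's for-loop, state = (merged, complements, conflicts)
def pvStepA (legacy : List String) (st : List String × Int × Int) (item : String) : List String × Int × Int :=
  if legacy.contains item then st
  else if !legacy.isEmpty then (st.1, st.2.1, st.2.2 + 1)
  else (st.1 ++ [item], st.2.1 + 1, st.2.2)

def merge_contact_lists_py (legacy_values : List String) (evidence_values : List String) : List String × (List (String × Int)) :=
  let legacy := legacy_values.filter (fun s => !(s == ""))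
  let evidence := evidence_values.filter (fun s => !(s == ""))
  let st := evidence.foldl (pvStepA legacy) (legacy, 0, 0)
  (st.1, [("complements", st.2.1), ("conflicts", st.2.2)])

-- ===== PORT B =====
def merge_contact_lists_py_alt (legacy_values : List String) (evidence_values : List String) : List String × (List (String × Int)) :=
  let legacy := legacy_values.filter (fun s => !(s == ""))
  let evidence := evidence_values.filter (fun s => !(s == ""))
  if legacy.isEmpty then
    (evidence, [("complements", (evidence.length : Int)), ("conflicts", 0)])
  else
    -- counts[item] = counts.get(item, 0) + 1 loop
    let counts := evidence.foldl (fun d x => PySem.Dict.modify d x 0 (· + 1)) PySem.Dict.empty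
    let legacySet := PySem.Set.ofList legacy
    let overlap : Int := ((counts.items.filter (fun p => PySem.Set.contains legacySet p.1)).map (·.2)).sum
    (legacy, [("complements", 0), ("conflicts", (evidence.length : Int) - overlap)])

-- ===== PRECONDITION & SPEC =====
def Spec_merge_contact_lists_py (legacy_values : List String) (evidence_values : List String) (out : List String × (List (String × Int))) : Prop := out = merge_contact_lists_py_alt legacy_values evidence_values
instance (legacy_values : List String) (evidence_values : List String) (out : List String × (List (String × Int))) : Decidable (Spec_merge_contact_lists_py legacy_values evidence_values out) := by unfold Spec_merge_contact_lists_py; infer_instance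

-- ===== CLAIM (what is proved, stated in full; the proofs are below) =====
def Claim_equal_merge_contact_lists_py : Prop := ∀ (legacy_values : List String) (evidence_values : List String), Dom_merge_contact_lists_py legacy_values evidence_values → Spec_merge_contact_lists_py legacy_values evidence_values (merge_contact_lists_py legacy_values evidence_values)

-- ===== LEMMAS AND PROOFS =====

-- A's loop over empty legacy: appends everything, counts complements
lemma foldA_nil (e : List String) (m : List String) (c k : Int) :
    e.foldl (pvStepA []) (m, c, k) = (m ++ e, c + e.length, k) := by
  induction e generalizing m c with
  | nil => simp
  | cons x xs ih =>
    have hstep : pvStepA [] (m, c, k) x = (m ++ [x], c + 1, k) := by simp [pvStepA]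
    rw [List.foldl_cons, hstep, ih]
    refine Prod.ext (by simp) (Prod.ext ?_ rfl)
    simp only [List.length_cons]
    push_cast; ring

-- A's loop over non-empty legacy: counts conflicts = evidence items not in legacy
lemma foldA_ne_nil (legacy : List String) (h : legacy ≠ []) (e : List String) (m : List String) (c k : Int) :
    e.foldl (pvStepA legacy) (m, c, k)
      = (m, c, k + (e.filter (fun x => !legacy.contains x)).length) := by
  induction e generalizing k with
  | nil => simp
  | cons x xs ih =>
    rw [List.foldl_cons]
    by_cases hx : x ∈ legacy
    · have hstep : pvStepA legacy (m, c, k) x = (m, c, k) := by simp [pvStepA, hx]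
      rw [hstep, ih]; simp [hx]
    · have hstep : pvStepA legacy (m, c, k) x = (m, c, k + 1) := by
        simp [pvStepA, hx, h]
      rw [hstep, ih]
      refine Prod.ext rfl (Prod.ext rfl ?_)
      simp only [List.filter_cons]
      simp [hx]; ring

lemma setContains_eq (legacy : List String) (x : String) :
    PySem.Set.contains (PySem.Set.ofList legacy) x = legacy.contains x := by
  simp only [PySem.Set.contains]
  by_cases hx : x ∈ legacy
  · simp [PySem.Set.mem_ofList, hx]
  · simp [PySem.Set.mem_ofList, hx]

-- sum of equality indicators over a list = count
lemma sum_ind (m : List String) (x : String) :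
    (m.map (fun k => if k = x then 1 else 0)).sum = m.count x := by
  induction m with
  | nil => simp
  | cons a l ih =>
    simp only [List.map_cons, List.sum_cons, List.count_cons, ih]
    by_cases hax : a = x
    · simp [hax]; omega
    · simp [hax]

-- summing e's multiplicities over a nodup key list covering all p-elements of e counts e.filter p
lemma sum_counts (e : List String) (l : List String) (p : String → Bool) (hnd : l.Nodup)
    (hcov : ∀ x ∈ e, p x = true → x ∈ l) :
    ((l.filter p).map (fun k => e.count k)).sum = (e.filter p).length := by
  induction e with
  | nil => simp
  | cons x e ih =>
    have hsplit : ((l.filter p).map (fun k => (x :: e).count k)).sum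
        = ((l.filter p).map (fun k => e.count k)).sum
          + ((l.filter p).map (fun k => if k = x then 1 else 0)).sum := by
      rw [← List.sum_map_add]
      refine congrArg _ (List.map_congr_left ?_)
      intro k hk
      rw [List.count_cons]
      by_cases hkx : k = x
      · simp [hkx]
      · have hxk : ¬ x = k := fun h => hkx h.symm
        simp [hkx, hxk]
    have hcnt : ((l.filter p).map (fun k => if k = x then 1 else 0)).sum
        = (l.filter p).count x := sum_ind _ _
    have hndf : (l.filter p).Nodup := hnd.filter p
    have ihx := ih (fun y hy hpy => hcov y (List.mem_cons_of_mem _ hy) hpy)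
    by_cases hpx : p x = true
    · have hxl : x ∈ l := hcov x (List.mem_cons_self) hpx
      have hxm : x ∈ l.filter p := List.mem_filter.mpr ⟨hxl, hpx⟩
      have h1 : (l.filter p).count x = 1 := List.count_eq_one_of_mem hndf hxm
      rw [hsplit, hcnt, h1, ihx]
      simp [hpx]
    · have hxm : x ∉ l.filter p := by
        intro hmem; exact hpx (List.mem_filter.mp hmem).2
      have h0 : (l.filter p).count x = 0 := List.count_eq_zero.mpr hxm
      rw [hsplit, hcnt, h0, ihx]
      simp [hpx]

-- filter-complement length split
lemma filter_split (e legacy : List String) :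
    (e.filter (fun x => legacy.contains x)).length
      + (e.filter (fun x => !legacy.contains x)).length = e.length := by
  induction e with
  | nil => simp
  | cons x xs ih =>
    simp only [List.filter_cons]
    by_cases hx : legacy.contains x = true
    · rw [if_pos hx, if_neg (by rw [hx]; simp)]
      simp only [List.length_cons]
      omega
    · have hfx : legacy.contains x = false := by rwa [Bool.not_eq_true] at hx
      rw [if_neg hx, if_pos (by rw [hfx]; rfl)]
      simp only [List.length_cons]
      omega

-- B's overlap over a non-empty legacy, as an Int
lemma overlap_eq (e legacy : List String) :
    ((((e.foldl (fun d x => PySem.Dict.modify d x 0 (· + 1)) PySem.Dict.empty).items.filter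
        (fun p => PySem.Set.contains (PySem.Set.ofList legacy) p.1)).map (·.2)).sum)
      = ((e.filter (fun x => legacy.contains x)).length : Int) := by
  have hc : (e.foldl (fun d x => PySem.Dict.modify d x 0 (· + 1)) PySem.Dict.empty)
      = PySem.Dict.counter e := (PySem.Dict.counter_eq_foldl e).symm
  rw [hc, PySem.Dict.items_counter]
  rw [List.filter_map, List.map_map]
  have hpred : ((fun p : String × Int => PySem.Set.contains (PySem.Set.ofList legacy) p.1) ∘
      (fun k => (k, (e.count k : Int)))) = (fun k => legacy.contains k) := by
    funext k; simp only [Function.comp]; rw [setContains_eq]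
  rw [hpred]
  have hmapped : ((·.2) ∘ (fun k : String => (k, (e.count k : Int)))) = (fun k => (e.count k : Int)) := by
    funext k; rfl
  rw [hmapped]
  have hsum := sum_counts e (PySem.Set.ofList e) (fun k => legacy.contains k)
    (PySem.Set.nodup_ofList e) ?_
  · have hcast : (List.map (fun k => ((List.count k e : Nat) : Int))
        (List.filter (fun k => legacy.contains k) (PySem.Set.ofList e))).sum
        = (((List.map (fun k => List.count k e)
            (List.filter (fun k => legacy.contains k) (PySem.Set.ofList e))).sum : Nat) : Int) := by
      rw [Nat.cast_list_sum, List.map_map]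
      rfl
    rw [hcast, hsum]
  · intro x hx _
    simp [PySem.Set.mem_ofList, hx]

-- ===== VERDICT (by name: the statement is the Claim_ definition above) =====
theorem merge_contact_lists_py_spec : Claim_equal_merge_contact_lists_py := by
  intro l e _
  unfold Spec_merge_contact_lists_py merge_contact_lists_py merge_contact_lists_py_alt
  dsimp only
  set legacy := l.filter (fun s => !(s == "")) with hleg
  set evidence := e.filter (fun s => !(s == "")) with hev
  by_cases h : legacy = []
  · rw [h, foldA_nil]; simp
  · rw [foldA_ne_nil legacy h]
    have hie : legacy.isEmpty = false := by simp [h]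
    rw [if_neg (by simp [hie])]
    rw [overlap_eq]
    have := filter_split evidence legacy
    refine Prod.ext (by simp) ?_
    simp only
    congr 2
    refine Prod.ext rfl ?_
    simp only
    omega
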